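-- pv_equiv track=rewrite | github.com/CenGes-Club/POSTe-N | payload.py | zeroth_function
-- ===== SOURCE A (Python) =====
-- def zeroth_function(leading_zeroes: str, number: list[str]) -> str:
--     formatted_number = ''
--     i = 0
--     for _ in leading_zeroes:
--         if i < len(number):
--             formatted_number += number[i]
--             i += 1
--         else:
--             formatted_number += '0'
--     return formatted_number
-- ===== SOURCE B (Python) =====
-- def zeroth_function(leading_zeroes: str, number: list[str]) -> str:
--     L = len(leading_zeroes)
--     taken = number[:L]
--     return ''.join(taken) + '0' * (L - len(taken))
-- ===== Notes on version B (the rewrite author's own statement) =====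
-- stated objective: simpler
-- what changed: The per-character loop with an interleaved counter and branch is replaced by two separate phases: one slice number[:len(leading_zeroes)] joined in a single ''.join, then the zero padding produced at once by string multiplication.
import Mathlib
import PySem

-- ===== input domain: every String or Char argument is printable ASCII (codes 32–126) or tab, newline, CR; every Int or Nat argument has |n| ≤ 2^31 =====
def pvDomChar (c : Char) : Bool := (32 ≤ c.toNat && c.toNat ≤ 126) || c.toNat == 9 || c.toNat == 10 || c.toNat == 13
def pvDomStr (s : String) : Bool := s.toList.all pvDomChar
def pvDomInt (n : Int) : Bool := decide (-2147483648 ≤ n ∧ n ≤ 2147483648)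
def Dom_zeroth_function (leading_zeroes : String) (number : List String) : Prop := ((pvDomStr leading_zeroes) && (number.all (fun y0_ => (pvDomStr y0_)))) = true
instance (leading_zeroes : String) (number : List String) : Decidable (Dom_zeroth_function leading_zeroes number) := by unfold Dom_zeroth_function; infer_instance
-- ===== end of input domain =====

-- ===== PORT A =====
-- Transliteration of A: fold over the characters of leading_zeroes carrying
-- (formatted_number, i); number[i] is PySem.List.pyGet? (the branch guard makes it in range).
def zeroth_function (leading_zeroes : String) (number : List String) : String :=
  (leading_zeroes.toList.foldl
    (fun (st : String × Int) _ =>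
      if st.2 < (number.length : Int) then
        (st.1 ++ ((PySem.List.pyGet? number st.2).getD ""), st.2 + 1)
      else
        (st.1 ++ "0", st.2))
    ("", 0)).1

-- ===== PORT B =====
-- B changes the decomposition: a slice number[:L] joined once, plus the padding in one piece
-- ('0' * n is ported by hand as String.ofList (List.replicate n '0'), exact: n copies of '0').
def zeroth_function_alt (leading_zeroes : String) (number : List String) : String :=
  let L := leading_zeroes.toList.length
  let taken := number.take L
  PySem.Str.join "" taken ++ String.ofList (List.replicate (L - taken.length) '0')

-- ===== PRECONDITION & SPEC =====
def Spec_zeroth_function (leading_zeroes : String) (number : List String) (out : String) : Prop := out = zeroth_function_alt leading_zeroes number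
instance (leading_zeroes : String) (number : List String) (out : String) : Decidable (Spec_zeroth_function leading_zeroes number out) := by unfold Spec_zeroth_function; infer_instance

-- ===== CLAIM (what is proved, stated in full; the proofs are below) =====
def Claim_equal_zeroth_function : Prop := ∀ (leading_zeroes : String) (number : List String), Dom_zeroth_function leading_zeroes number → Spec_zeroth_function leading_zeroes number (zeroth_function leading_zeroes number)

-- ===== LEMMAS AND PROOFS =====

-- ===== VERDICT (by name: the statement is the Claim_ definition above) =====
-- Chars.join with empty separator is plain concatenation, one step.
theorem joinE_cons (p : List Char) (rest : List (List Char)) :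
    PySem.Chars.join [] (p :: rest) = p ++ PySem.Chars.join [] rest := by
  cases rest with
  | nil => simp [PySem.Chars.join_singleton, PySem.Chars.join_nil]
  | cons q r => simp [PySem.Chars.join_cons_cons]

-- Loop invariant for A's fold: starting at index i with accumulator acc, the loop over cs
-- appends the next cs.length entries of ns (as far as they exist) and pads with '0' after.
theorem loopA (ns : List String) (cs : List Char) :
    ∀ (i : Nat) (acc : String),
    (cs.foldl
      (fun (st : String × Int) _ =>
        if st.2 < (ns.length : Int) then
          (st.1 ++ ((PySem.List.pyGet? ns st.2).getD ""), st.2 + 1)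
        else
          (st.1 ++ "0", st.2))
      (acc, (i : Int))).1.toList
    = acc.toList ++ PySem.Chars.join [] (((ns.drop i).take cs.length).map String.toList)
        ++ List.replicate (cs.length - (ns.length - i)) '0' := by
  induction cs with
  | nil => intro i acc; simp [PySem.Chars.join_nil]
  | cons c cs ih =>
    intro i acc
    by_cases h : i < ns.length
    · have hget : PySem.List.pyGet? ns (i : Int) = some ns[i] := by
        simp [PySem.List.pyGet?_natCast]
      have hdrop : ns.drop i = ns[i] :: ns.drop (i + 1) := List.drop_eq_getElem_cons h
      have hcount : cs.length + 1 - (ns.length - i) = cs.length - (ns.length - (i + 1)) := by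
        omega
      have hstep : ((i : Int) + 1) = ((i + 1 : Nat) : Int) := by push_cast; ring
      simp only [List.foldl_cons]
      rw [if_pos (show (i : Int) < (ns.length : Int) by exact_mod_cast h)]
      simp only [hget, Option.getD_some, hstep, ih (i + 1) (acc ++ ns[i]), hdrop,
        List.length_cons, List.take_succ_cons, List.map_cons, joinE_cons, String.toList_append,
        hcount, List.append_assoc]
    · have hge : ¬ ((i : Int) < (ns.length : Int)) := by exact_mod_cast h
      have hdrop : ns.drop i = [] := List.drop_eq_nil_of_le (by omega)
      have hcount : cs.length + 1 - (ns.length - i) = cs.length - (ns.length - i) + 1 := by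
        omega
      simp only [List.foldl_cons, if_neg hge, ih i (acc ++ "0"), hdrop, List.take_nil,
        List.map_nil, List.length_cons, hcount, String.toList_append]
      simp [List.replicate_succ]

theorem zeroth_function_spec : Claim_equal_zeroth_function := by
  intro lz ns _
  show _ = _
  apply String.toList_inj.mp
  have h := loopA ns lz.toList 0 ""
  simp only [Int.natCast_zero] at h
  simp only [zeroth_function, zeroth_function_alt, h, List.drop_zero, Nat.sub_zero]
  simp only [PySem.Str.toList_join, String.toList_append, List.length_take,
    String.length_toList, String.toList_ofList, String.toList_empty, List.nil_append,
    List.append_cancel_left_eq]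
  have : lz.length - min lz.length ns.length = lz.length - ns.length := by omega
  rw [this]
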